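-- pv_equiv track=rewrite | github.com/sihwan0Lee/algorithm_study | PYTHON/test.py | answer
-- ===== SOURCE A (Python) =====
-- def answer(_list):
--     answer = 0
--     for i in _list:
--         for j in range(1, i + 1):
--             if j * j == i:
--                 answer += 1
--     if answer > 0:
--         T = "found"
--         return T
--     else:
--         F = "not found"
--         return F
-- ===== SOURCE B (Python) =====
-- def answer(_list):
--     if not _list:
--         return "not found"
--     m = max(_list)
--     squares = set()
--     k = 1
--     while k * k <= m:
--         squares.add(k * k)
--         k += 1
--     return "found" if any(x in squares for x in _list) else "not found"
-- ===== Notes on version B (the rewrite author's own statement) =====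
-- stated objective: faster
-- what changed: Instead of A's per-element trial loop over range(1, i+1), B computes the maximum once, builds the set of positive perfect squares up to it in O(sqrt(max)) steps, and answers by set membership.
import Mathlib
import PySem

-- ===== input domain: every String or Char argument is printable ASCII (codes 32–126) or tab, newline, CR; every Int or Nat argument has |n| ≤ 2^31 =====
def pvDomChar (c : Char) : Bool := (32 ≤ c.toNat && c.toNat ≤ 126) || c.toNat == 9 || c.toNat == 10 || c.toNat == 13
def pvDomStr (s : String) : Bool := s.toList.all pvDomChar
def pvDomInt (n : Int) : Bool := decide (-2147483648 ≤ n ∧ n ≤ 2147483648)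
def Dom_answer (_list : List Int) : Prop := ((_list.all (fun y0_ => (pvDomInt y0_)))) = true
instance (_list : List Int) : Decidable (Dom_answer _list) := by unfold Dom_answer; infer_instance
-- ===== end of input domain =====

-- B replaces A's per-element upward trial loop by one table of positive squares up to max(_list),
-- built once, followed by a membership pass (objective: faster).

-- ===== PORT A =====
-- A's counter 'answer' is the fold accumulator; the final 'if answer > 0' tests it directly.
def answer (_list : List Int) : String :=
  if _list.foldl (fun acc i =>
      (PySem.List.pyRange 1 (i + 1) 1).foldl (fun a j => if j * j = i then a + 1 else a) acc)
      (0 : Int) > 0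
  then "found" else "not found"

-- ===== PORT B =====
-- B's while-loop: k runs upward while k*k <= m, adding k*k to the set 'squares' (the s accumulator).
def buildSquares (m k : Int) (s : PySem.Set Int) : PySem.Set Int :=
  if k * k ≤ m then buildSquares m (k + 1) (PySem.Set.add s (k * k)) else s
termination_by (m + 1 - k).toNat
decreasing_by
  rename_i h
  have hk : k ≤ m := by
    by_cases h1 : 1 ≤ k
    · nlinarith
    · nlinarith [mul_self_nonneg k]
  omega

-- Python B guards the empty list before computing max(_list); max? = none exactly on the empty
-- list, so the guard and the max computation are ported as one match.
def answer_alt (_list : List Int) : String :=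
  match PySem.List.max? _list (fun x => x) with
  | none => "not found"
  | some m =>
    if _list.any (fun x => PySem.Set.contains (buildSquares m 1 PySem.Set.empty) x)
    then "found" else "not found"

-- ===== PRECONDITION & SPEC =====
def Spec_answer (_list : List Int) (out : String) : Prop := out = answer_alt _list
instance (_list : List Int) (out : String) : Decidable (Spec_answer _list out) := by unfold Spec_answer; infer_instance

-- ===== CLAIM (what is proved, stated in full; the proofs are below) =====
def Claim_equal_answer : Prop := ∀ (_list : List Int), Dom_answer _list → Spec_answer _list (answer _list)

-- ===== LEMMAS AND PROOFS =====

-- A's inner loop is a countP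
theorem foldl_count (i : Int) (xs : List Int) (acc : Int) :
    xs.foldl (fun a j => if j * j = i then a + 1 else a) acc
      = acc + (xs.countP (fun j => j * j == i) : Int) := by
  induction xs generalizing acc with
  | nil => simp
  | cons x t ih =>
    rw [List.foldl_cons, ih, List.countP_cons]
    by_cases h : x * x = i
    · simp [h]
      omega
    · simp [h]

def cnt (i : Int) : Nat := (PySem.List.pyRange 1 (i + 1) 1).countP (fun j => j * j == i)

theorem outer_fold (l : List Int) (acc : Int) :
    l.foldl (fun acc i =>
      (PySem.List.pyRange 1 (i + 1) 1).foldl (fun a j => if j * j = i then a + 1 else a) acc) acc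
      = acc + ((l.map cnt).sum : Int) := by
  induction l generalizing acc with
  | nil => simp
  | cons x t ih =>
    rw [List.foldl_cons, foldl_count, ih, List.map_cons, List.sum_cons]
    simp only [cnt]
    push_cast
    ring

theorem answer_eq (l : List Int) :
    answer l = if ((l.map cnt).sum : Int) > 0 then "found" else "not found" := by
  unfold answer
  rw [outer_fold]
  norm_num

theorem sum_map_pos_iff (l : List Int) : 0 < (l.map cnt).sum ↔ ∃ i ∈ l, 0 < cnt i := by
  induction l with
  | nil => simp
  | cons x t ih =>
    rw [List.map_cons, List.sum_cons,
      show (0 < cnt x + (t.map cnt).sum ↔ 0 < cnt x ∨ 0 < (t.map cnt).sum) from by omega, ih]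
    constructor
    · rintro (h | ⟨i, hi, h⟩)
      · exact ⟨x, List.mem_cons_self, h⟩
      · exact ⟨i, List.mem_cons_of_mem _ hi, h⟩
    · rintro ⟨i, hi, h⟩
      rcases List.mem_cons.mp hi with rfl | hi
      · exact Or.inl h
      · exact Or.inr ⟨i, hi, h⟩

theorem cnt_pos_iff (i : Int) : 0 < cnt i ↔ ∃ j : Int, 1 ≤ j ∧ j * j = i := by
  unfold cnt
  rw [List.countP_pos_iff]
  constructor
  · rintro ⟨j, hj, hji⟩
    rw [PySem.List.mem_pyRange_one] at hj
    exact ⟨j, hj.1, eq_of_beq hji⟩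
  · rintro ⟨j, hj1, hji⟩
    refine ⟨j, ?_, beq_iff_eq.mpr hji⟩
    rw [PySem.List.mem_pyRange_one]
    exact ⟨hj1, by nlinarith⟩

theorem answer_found_iff (l : List Int) :
    answer l = "found" ↔ ∃ i ∈ l, ∃ j : Int, 1 ≤ j ∧ j * j = i := by
  rw [answer_eq]
  constructor
  · intro h
    split_ifs at h with hp
    · have hs : 0 < (l.map cnt).sum := by exact_mod_cast hp
      obtain ⟨i, hil, hc⟩ := (sum_map_pos_iff l).mp hs
      exact ⟨i, hil, (cnt_pos_iff i).mp hc⟩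
    · exact absurd h (by decide)
  · rintro ⟨i, hil, hj⟩
    have hs : 0 < (l.map cnt).sum :=
      (sum_map_pos_iff l).mpr ⟨i, hil, (cnt_pos_iff i).mpr hj⟩
    rw [if_pos (by exact_mod_cast hs)]

theorem mem_buildSquares (m k : Int) (s : PySem.Set Int) (x : Int) (hk : 1 ≤ k) :
    x ∈ buildSquares m k s ↔ x ∈ s ∨ ∃ j : Int, k ≤ j ∧ j * j ≤ m ∧ j * j = x := by
  revert hk
  induction k, s using buildSquares.induct m with
  | case1 k s h ih =>
    intro hk
    rw [buildSquares, if_pos h, ih (by omega), PySem.Set.mem_add]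
    constructor
    · rintro (⟨hs | rfl⟩ | ⟨j, hj, hjm, rfl⟩)
      · exact Or.inl hs
      · exact Or.inr ⟨k, le_refl k, h, rfl⟩
      · exact Or.inr ⟨j, by omega, hjm, rfl⟩
    · rintro (hs | ⟨j, hj, hjm, rfl⟩)
      · exact Or.inl (Or.inl hs)
      · rcases eq_or_lt_of_le hj with rfl | hlt
        · exact Or.inl (Or.inr rfl)
        · exact Or.inr ⟨j, by omega, hjm, rfl⟩
  | case2 k s h =>
    intro hk
    rw [buildSquares, if_neg h]
    constructor
    · exact Or.inl
    · rintro (hs | ⟨j, hj, hjm, rfl⟩)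
      · exact hs
      · exact absurd hjm (by intro hc; exact h (le_trans (by nlinarith : k * k ≤ j * j) hc))

theorem answer_alt_found_iff (l : List Int) :
    answer_alt l = "found" ↔ ∃ i ∈ l, ∃ j : Int, 1 ≤ j ∧ j * j = i := by
  unfold answer_alt
  cases hmax : PySem.List.max? l (fun x => x) with
  | none =>
    have hl : l = [] := (PySem.List.max?_eq_none_iff l _).mp hmax
    subst hl
    simp
  | some m =>
    dsimp only
    have hismax := PySem.List.max?_isMax hmax
    constructor
    · intro h
      split_ifs at h with hany
      · obtain ⟨x, hxl, hxs⟩ := List.any_eq_true.mp hany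
        have hx : x ∈ buildSquares m 1 PySem.Set.empty := by
          simpa [PySem.Set.contains] using hxs
        rw [mem_buildSquares m 1 _ _ (by norm_num)] at hx
        rcases hx with hs | ⟨j, hj1, _, rfl⟩
        · exact absurd hs (by simp [PySem.Set.empty])
        · exact ⟨j * j, hxl, j, hj1, rfl⟩
      · exact absurd h (by decide)
    · rintro ⟨i, hil, j, hj1, rfl⟩
      have hmem : j * j ∈ buildSquares m 1 PySem.Set.empty := by
        rw [mem_buildSquares m 1 _ _ (by norm_num)]
        exact Or.inr ⟨j, hj1, hismax _ hil, rfl⟩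
      have hany : l.any (fun x => PySem.Set.contains (buildSquares m 1 PySem.Set.empty) x) = true :=
        List.any_eq_true.mpr ⟨j * j, hil, by simpa [PySem.Set.contains] using hmem⟩
      rw [if_pos hany]

theorem answer_vals (l : List Int) : answer l = "found" ∨ answer l = "not found" := by
  rw [answer_eq]
  split_ifs
  · exact Or.inl rfl
  · exact Or.inr rfl

theorem answer_alt_vals (l : List Int) : answer_alt l = "found" ∨ answer_alt l = "not found" := by
  unfold answer_alt
  cases PySem.List.max? l (fun x => x) with
  | none => exact Or.inr rfl
  | some m =>
    dsimp only
    split_ifs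
    · exact Or.inl rfl
    · exact Or.inr rfl

-- ===== VERDICT (by name: the statement is the Claim_ definition above) =====
theorem answer_spec : Claim_equal_answer := by
  intro l _
  unfold Spec_answer
  have hiff := (answer_found_iff l).trans (answer_alt_found_iff l).symm
  rcases answer_vals l with ha | ha <;> rcases answer_alt_vals l with hb | hb
  · rw [ha, hb]
  · exact absurd (hiff.mp ha) (by rw [hb]; decide)
  · exact absurd (hiff.mpr hb) (by rw [ha]; decide)
  · rw [ha, hb]
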